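-- pv_equiv track=rewrite | github.com/joesustaric/advent-of-code-24 | advent/day02/second.py | remove_first_error_from_data
-- ===== SOURCE A (Python) =====
-- NOT_DETERMINED = 0
--
-- INCREASING = 1
--
-- DECREASING = 2
--
-- SAME = 3
--
-- MIN_TOLERANCE = 1
--
-- MAX_TOLERANCE = 3
--
-- NEXT_ITEM = 1
--
-- def remove_first_error_from_data(data) -> list:
--     old_direction = NOT_DETERMINED
--     for index in range(len(data)):
--         if _last_value(index, data):
--             break
--         numb_1, numb_2 = _get_numbers_to_compare(index, data)
--         new_direction = _get_direction(numb_1, numb_2)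
--         delta = _calculate_delta(numb_1, numb_2)
--
--         if _changed_direction(old_direction, new_direction):
--             data.pop(index)
--             return data
--         elif not _delta_within_tolerance(delta):
--             data.pop(index)
--             return data
--
--         old_direction = new_direction
--
--     return data
--
-- def _get_numbers_to_compare(index, data) -> tuple:
--     return data[index], data[index + NEXT_ITEM]
--
-- def _delta_within_tolerance(delta):
--     return delta >= MIN_TOLERANCE and delta <= MAX_TOLERANCE
--
-- def _get_direction(numb_1, numb_2):
--     if numb_1 < numb_2:
--         return INCREASING
--     elif numb_1 > numb_2:
--         return DECREASING
--     elif numb_1 == numb_2: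
--         return SAME
--
-- def _calculate_delta(numb_1, numb_2):
--     if numb_1 > numb_2:
--         return numb_1 - numb_2
--     elif numb_1 < numb_2:
--         return numb_2 - numb_1
--     elif numb_1 == numb_2:
--         return 0
--
-- def _last_value(index, data):
--     return index + NEXT_ITEM == len(data)
--
-- def _changed_direction(old_direction, new_direction):
--     if old_direction == NOT_DETERMINED:
--         return False
--     return new_direction != old_direction
-- ===== SOURCE B (Python) =====
-- def remove_first_error_from_data(data) -> list:
--     # Structural recursion instead of an index loop; returns a rebuilt list
--     # (does NOT mutate data in place, unlike A; return values are equal).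
--     def go(x, rest, rising):
--         # returns the fixed list from x's position, or None if no error found
--         if not rest:
--             return None
--         y = rest[0]
--         if (rising is not None and (y > x) != rising) or not (1 <= abs(y - x) <= 3):
--             return rest  # drop x
--         fixed = go(y, rest[1:], y > x)
--         return None if fixed is None else [x] + fixed
--     if not data:
--         return data
--     fixed = go(data[0], data[1:], None)
--     return data if fixed is None else fixed
-- ===== Notes on version B (the rewrite author's own statement) =====
-- stated objective: alternative
-- what changed: Replaces A's index loop with pop-based in-place mutation and its five helper functions by a structural recursion on the list that carries the previous direction as an Optional bool and rebuilds the result by consing (Optional return signals 'no error'); B does not mutate its argument, only the return value is matched.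
import Mathlib
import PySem

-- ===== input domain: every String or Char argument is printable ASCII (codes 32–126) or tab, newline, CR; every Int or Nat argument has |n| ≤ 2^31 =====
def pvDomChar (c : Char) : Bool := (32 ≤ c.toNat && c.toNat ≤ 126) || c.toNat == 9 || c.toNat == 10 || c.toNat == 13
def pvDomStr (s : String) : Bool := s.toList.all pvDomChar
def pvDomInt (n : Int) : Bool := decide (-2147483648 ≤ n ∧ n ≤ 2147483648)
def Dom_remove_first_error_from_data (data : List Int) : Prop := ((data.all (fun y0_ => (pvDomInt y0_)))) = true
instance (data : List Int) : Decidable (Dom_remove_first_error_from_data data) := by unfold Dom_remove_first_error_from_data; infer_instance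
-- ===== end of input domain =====

-- B replaces A's index loop (in-place pop, direction/delta state machine with five helpers) by a
-- structural recursion on the list carrying the previous direction as an Option Bool and rebuilding
-- the output by consing (objective: alternative). A mutates `data` in place via pop; B does not:
-- the theorems here are about the RETURN value only.

-- ===== PORT A =====
-- helpers of A, transliterated
def aGetDirection (numb_1 numb_2 : Int) : Int :=
  if numb_1 < numb_2 then 1 else if numb_1 > numb_2 then 2 else 3

def aCalculateDelta (numb_1 numb_2 : Int) : Int :=
  if numb_1 > numb_2 then numb_1 - numb_2 else if numb_1 < numb_2 then numb_2 - numb_1 else 0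

def aChangedDirection (old_direction new_direction : Int) : Bool :=
  if old_direction = 0 then false else decide (new_direction ≠ old_direction)

def aDeltaWithinTolerance (delta : Int) : Bool :=
  decide (1 ≤ delta) && decide (delta ≤ 3)

-- the `for index in range(len(data))` loop, fuel = number of remaining indices
def aLoop (data : List Int) (old_direction : Int) (index fuel : Nat) : List Int :=
  match fuel with
  | 0 => data
  | f + 1 =>
    if index + 1 = data.length then data          -- _last_value: break, then return data
    else
      let numb_1 := PySem.List.pyGetD data (index : Int) 0       -- data[index], always in range here
      let numb_2 := PySem.List.pyGetD data ((index : Int) + 1) 0 -- data[index + NEXT_ITEM]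
      let new_direction := aGetDirection numb_1 numb_2
      let delta := aCalculateDelta numb_1 numb_2
      if aChangedDirection old_direction new_direction then
        data.take index ++ data.drop (index + 1)  -- data.pop(index); return data
      else if ¬ aDeltaWithinTolerance delta then
        data.take index ++ data.drop (index + 1)
      else aLoop data new_direction (index + 1) f

def remove_first_error_from_data (data : List Int) : List Int :=
  aLoop data 0 0 data.length

-- ===== PORT B =====
-- the inner recursive function go(x, rest, rising): fixed list from x's position, or none
def bGo (x : Int) (rest : List Int) (rising : Option Bool) : Option (List Int) :=
  match rest with
  | [] => none
  | y :: rs =>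
    if (match rising with | some r => decide (x < y) != r | none => false)
        || !(decide (1 ≤ |y - x|) && decide (|y - x| ≤ 3)) then
      some (y :: rs)                               -- drop x
    else
      match bGo y rs (some (decide (x < y))) with
      | none => none
      | some fixed => some (x :: fixed)

def remove_first_error_from_data_alt (data : List Int) : List Int :=
  match data with
  | [] => data
  | x :: rest =>
    match bGo x rest none with
    | none => data
    | some fixed => fixed

-- ===== PRECONDITION & SPEC =====
def Spec_remove_first_error_from_data (data : List Int) (out : List Int) : Prop := out = remove_first_error_from_data_alt data
instance (data : List Int) (out : List Int) : Decidable (Spec_remove_first_error_from_data data out) := by unfold Spec_remove_first_error_from_data; infer_instance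

-- ===== CLAIM (what is proved, stated in full; the proofs are below) =====
def Claim_equal_remove_first_error_from_data : Prop := ∀ (data : List Int), Dom_remove_first_error_from_data data → Spec_remove_first_error_from_data data (remove_first_error_from_data data)

-- ===== LEMMAS AND PROOFS =====

-- A's first-pair condition (no established direction) = B's magnitude test alone
lemma cond_eq_zero (x y : Int) :
    (aChangedDirection 0 (aGetDirection x y) || !aDeltaWithinTolerance (aCalculateDelta x y)) =
    !(decide (1 ≤ |y - x|) && decide (|y - x| ≤ 3)) := by
  unfold aChangedDirection aGetDirection aCalculateDelta aDeltaWithinTolerance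
  rcases lt_trichotomy x y with h | h | h <;>
    simp_all [abs_of_pos, abs_of_neg] <;> (try split_ifs) <;>
      (try rw [Bool.eq_iff_iff]) <;> simp_all <;> omega

-- A's condition at a later pair (previous pair p,x passed, so p ≠ x) = B's sign-or-magnitude test
lemma cond_eq (p x y : Int) (hne : p ≠ x) :
    (aChangedDirection (aGetDirection p x) (aGetDirection x y) ||
      !aDeltaWithinTolerance (aCalculateDelta x y)) =
    ((decide (x < y) != decide (p < x)) ||
      !(decide (1 ≤ |y - x|) && decide (|y - x| ≤ 3))) := by
  unfold aChangedDirection aGetDirection aCalculateDelta aDeltaWithinTolerance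
  rcases lt_trichotomy p x with h | h | h <;>
    rcases lt_trichotomy x y with h' | h' | h' <;>
      simp_all [abs_of_pos, abs_of_neg] <;> (try split_ifs) <;>
        (try rw [Bool.eq_iff_iff]) <;> simp_all <;> omega

-- A's nested if-pop-if-pop collapses to one disjunctive guard
lemma if_if_or {a : Type} (c b : Bool) (P r : a) :
    (if c then P else if ¬ b then P else r) = (if (c || !b) then P else r) := by
  cases c <;> cases b <;> simp

lemma loop_eq (data : List Int) (fuel : Nat) : ∀ (i : Nat) (old : Int) (rising : Option Bool),
    fuel + i = data.length → i < data.length →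
    ((old = 0 ∧ rising = none) ∨
      (0 < i ∧ old = aGetDirection (data.getD (i - 1) 0) (data.getD i 0) ∧
        rising = some (decide (data.getD (i - 1) 0 < data.getD i 0)) ∧
        data.getD (i - 1) 0 ≠ data.getD i 0)) →
    aLoop data old i fuel =
      (match bGo (data.getD i 0) (data.drop (i + 1)) rising with
        | none => data
        | some fixed => data.take i ++ fixed) := by
  induction fuel with
  | zero => intro i old rising hf hi _; omega
  | succ f ih =>
    intro i old rising hf hi hinv
    by_cases hlast : i + 1 = data.length
    · have h0 : data.drop (i + 1) = [] := by
        apply List.drop_eq_nil_of_le; omega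
      simp [aLoop, hlast, h0, bGo]
    · have hi1 : i + 1 < data.length := by omega
      have hdrop : data.drop (i + 1) = data.getD (i + 1) 0 :: data.drop (i + 2) := by
        rw [List.drop_eq_getElem_cons hi1, List.getD_eq_getElem _ _ hi1]
      have hn1 : PySem.List.pyGetD data (i : Int) 0 = data.getD i 0 := by
        simp [PySem.List.pyGetD_natCast]
      have hn2 : PySem.List.pyGetD data ((i : Int) + 1) 0 = data.getD (i + 1) 0 := by
        have hc : ((i : Int) + 1) = ((i + 1 : Nat) : Int) := by push_cast; ring
        rw [hc, PySem.List.pyGetD_natCast]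
      have htake : data.take (i + 1) = data.take i ++ [data.getD i 0] := by
        rw [List.getD_eq_getElem _ _ (by omega : i < data.length),
            List.take_add_one, List.getElem?_eq_getElem (by omega : i < data.length)]
        simp
      have hcontinue :
          (decide (1 ≤ |data.getD (i + 1) 0 - data.getD i 0|) &&
            decide (|data.getD (i + 1) 0 - data.getD i 0| ≤ 3)) = true →
          aLoop data (aGetDirection (data.getD i 0) (data.getD (i + 1) 0)) (i + 1) f =
          (match (match bGo (data.getD (i + 1) 0) (data.drop (i + 2))
                      (some (decide (data.getD i 0 < data.getD (i + 1) 0))) with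
                | none => none
                | some fixed => some (data.getD i 0 :: fixed)) with
            | none => data
            | some fixed => data.take i ++ fixed) := by
        intro htol
        have h1 : (1 : Int) ≤ |data.getD (i + 1) 0 - data.getD i 0| :=
          of_decide_eq_true (Bool.and_eq_true_iff.mp htol).1
        have hxy : data.getD i 0 ≠ data.getD (i + 1) 0 := by
          intro he; rw [he] at h1; simp at h1
        have hrec := ih (i + 1) (aGetDirection (data.getD i 0) (data.getD (i + 1) 0))
          (some (decide (data.getD i 0 < data.getD (i + 1) 0))) (by omega) hi1
          (Or.inr ⟨by omega, by simp, by simp, by simpa using hxy⟩)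
        rw [hrec]
        cases hres : bGo (data.getD (i + 1) 0) (data.drop (i + 2))
            (some (decide (data.getD i 0 < data.getD (i + 1) 0))) with
        | none => rfl
        | some fixed => rw [htake]; simp
      rw [hdrop]
      simp only [aLoop, if_neg hlast, hn1, hn2, bGo]
      rw [if_if_or]
      rcases hinv with ⟨h0, hr⟩ | ⟨hipos, holdv, hrv, hne⟩
      · subst h0; subst hr
        rw [cond_eq_zero]
        simp only [Bool.false_or]
        cases hG : (!(decide (1 ≤ |data.getD (i + 1) 0 - data.getD i 0|) &&
            decide (|data.getD (i + 1) 0 - data.getD i 0| ≤ 3))) with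
        | true => simp only [if_true, hdrop]
        | false =>
          simp only [Bool.false_eq_true, if_false]
          exact hcontinue (by simpa using hG)
      · subst hrv; rw [holdv, cond_eq _ _ _ hne]
        cases hG : ((decide (data.getD i 0 < data.getD (i + 1) 0) !=
            decide (data.getD (i - 1) 0 < data.getD i 0)) ||
            !(decide (1 ≤ |data.getD (i + 1) 0 - data.getD i 0|) &&
              decide (|data.getD (i + 1) 0 - data.getD i 0| ≤ 3))) with
        | true => simp only [if_true, hdrop]
        | false =>
          simp only [Bool.false_eq_true, if_false]
          have htol : (decide (1 ≤ |data.getD (i + 1) 0 - data.getD i 0|) &&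
              decide (|data.getD (i + 1) 0 - data.getD i 0| ≤ 3)) = true := by
            rcases Bool.or_eq_false_iff.mp hG with ⟨_, h2⟩
            simpa using h2
          exact hcontinue htol

-- ===== VERDICT (by name: the statement is the Claim_ definition above) =====
theorem remove_first_error_from_data_spec : Claim_equal_remove_first_error_from_data := by
  intro data _
  unfold Spec_remove_first_error_from_data remove_first_error_from_data remove_first_error_from_data_alt
  cases data with
  | nil => simp [aLoop]
  | cons x rest =>
    have h := loop_eq (x :: rest) (x :: rest).length 0 0 none (by omega)
      (by simp) (Or.inl ⟨rfl, rfl⟩)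
    simpa using h
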